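-- pv_equiv track=rewrite | github.com/LytheanSem/ABAC | Algorithm Design/assignment2.py | min_cost_to_buy_apples
-- ===== SOURCE A (Python) =====
-- def min_cost_to_buy_apples(C, test_cases):
--     results = []
--
--     for i in range(C):
--         N, K = test_cases[i][0]
--         prices = test_cases[i][1]
--
--         # Initialize the dp array with None
--         dp = [None] * (K + 1)
--         dp[0] = 0  # No cost to buy 0 kg of apples
--
--         for j in range(1, K + 1):
--             if prices[j - 1] != -1:  # Only consider available packets
--                 for k in range(j, K + 1):
--                     if dp[k - j] is not None:
--                         if dp[k] is None:
--                             dp[k] = dp[k - j] + prices[j - 1]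
--                         else:
--                             dp[k] = min(dp[k], dp[k - j] + prices[j - 1])
--
--         result = dp[K] if dp[K] is not None else -1
--         results.append(result)
--
--     return results
-- ===== SOURCE B (Python) =====
-- def min_cost_to_buy_apples(C, test_cases):
--     # Bellman-Ford value iteration: f[k] after t rounds = min cost of buying
--     # exactly k kg with AT MOST t packets; K rounds of full relaxation suffice
--     # since an exact-sum solution never uses more than K packets.
--     results = []
--     for i in range(C):
--         (N, K), prices = test_cases[i]
--         f = [0] + [None] * K
--         for _ in range(K):
--             g = list(f)
--             for k in range(1, K + 1):
--                 for j in range(1, k + 1):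
--                     p = prices[j - 1]
--                     if p != -1 and f[k - j] is not None:
--                         c = f[k - j] + p
--                         if g[k] is None or c < g[k]:
--                             g[k] = c
--             f = g
--         results.append(f[K] if f[K] is not None else -1)
--     return results
-- ===== Notes on version B (the rewrite author's own statement) =====
-- stated objective: alternative
-- what changed: Replaced A's coin-indexed in-place forward-scan DP by Bellman-Ford value iteration: K rounds of full relaxation over a vector f where f[k] after t rounds is the cheapest way to buy exactly k kg with at most t packets; correct because an exact-sum solution uses at most K packets of weight >= 1.
import Mathlib
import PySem

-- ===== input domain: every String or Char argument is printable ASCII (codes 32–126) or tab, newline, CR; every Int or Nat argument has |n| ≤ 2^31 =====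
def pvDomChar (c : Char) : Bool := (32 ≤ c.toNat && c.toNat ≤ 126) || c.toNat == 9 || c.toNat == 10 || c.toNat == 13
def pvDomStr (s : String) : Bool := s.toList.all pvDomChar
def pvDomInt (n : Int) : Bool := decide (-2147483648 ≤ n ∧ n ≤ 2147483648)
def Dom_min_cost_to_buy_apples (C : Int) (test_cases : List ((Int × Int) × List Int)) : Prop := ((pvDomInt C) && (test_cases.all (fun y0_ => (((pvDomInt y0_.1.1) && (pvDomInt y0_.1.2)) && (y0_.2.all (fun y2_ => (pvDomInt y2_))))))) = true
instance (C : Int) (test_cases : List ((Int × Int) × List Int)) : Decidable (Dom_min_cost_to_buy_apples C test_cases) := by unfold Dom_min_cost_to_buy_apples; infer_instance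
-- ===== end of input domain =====

-- B replaces A's coin-indexed in-place forward-scan DP by Bellman-Ford value iteration
-- (K rounds of full relaxation over a copied vector); alternative algorithm, not faster.

-- ===== PORT A =====
-- the body of A's inner 'for k in range(j, K + 1)' loop
def pvAStep (c p : Int) (dp : List (Option Int)) (k : Int) : List (Option Int) :=
  match PySem.List.pyGetD dp (k - c) none with
  | some v =>
    match PySem.List.pyGetD dp k none with
    | none => PySem.List.pySetD dp k (some (v + p))
    | some w => PySem.List.pySetD dp k (some (min w (v + p)))
  | none => dp

-- the body of A's outer 'for j in range(1, K + 1)' loop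
def pvAOuterStep (pr : List Int) (K : Int) (dp : List (Option Int)) (j : Int) : List (Option Int) :=
  match PySem.List.pyGet? pr (j - 1) with
  | none => dp
  | some p =>
    if p ≠ -1 then
      (PySem.List.pyRange j (K + 1) 1).foldl (pvAStep j p) dp
    else dp

-- one test case of A: preallocated None table, dp[0] = 0, coin-outer in-place scans
def aSolve (K : Int) (prices : List Int) : Int :=
  let dp0 := PySem.List.pySetD (List.replicate (K + 1).toNat (none : Option Int)) 0 (some 0)
  let dp := (PySem.List.pyRange 1 (K + 1) 1).foldl (pvAOuterStep prices K) dp0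
  match PySem.List.pyGetD dp K none with
  | some v => v
  | none => -1

def min_cost_to_buy_apples (C : Int) (test_cases : List ((Int × Int) × List Int)) : List Int :=
  (PySem.List.pyRange 0 C 1).foldl (fun results i =>
    match PySem.List.pyGet? test_cases i with
    | none => results         -- Python raises IndexError here; excluded by Pre_
    | some tc => results ++ [aSolve tc.1.2 tc.2]) []

-- ===== PORT B =====
-- the body of B's innermost 'for j in range(1, k + 1)' loop; acc is the current g[k]
def pvBInnerStep (pr : List Int) (f : List (Option Int)) (k : Int) (acc : Option Int) (j : Int) : Option Int :=
  match PySem.List.pyGet? pr (j - 1) with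
  | none => acc
  | some p =>
    if p ≠ -1 then
      match PySem.List.pyGetD f (k - j) none with
      | some v =>
        let c := v + p
        match acc with
        | none => some c
        | some b => if c < b then some c else acc
      | none => acc
    else acc

-- one relaxation round of B: g = list(f); for k in 1..K update g[k]; return g
def pvBRound (pr : List Int) (K : Int) (f : List (Option Int)) : List (Option Int) :=
  (PySem.List.pyRange 1 (K + 1) 1).foldl (fun g k =>
    PySem.List.pySetD g k
      ((PySem.List.pyRange 1 (k + 1) 1).foldl (pvBInnerStep pr f k) (PySem.List.pyGetD g k none))) f

-- one test case of B: f = [0] + [None]*K, then K rounds of full relaxation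
def bSolve (K : Int) (prices : List Int) : Int :=
  let f := (PySem.List.pyRange 0 K 1).foldl (fun f _ => pvBRound prices K f)
    (some 0 :: List.replicate K.toNat none)
  match PySem.List.pyGetD f K none with
  | some v => v
  | none => -1

def min_cost_to_buy_apples_alt (C : Int) (test_cases : List ((Int × Int) × List Int)) : List Int :=
  (PySem.List.pyRange 0 C 1).foldl (fun results i =>
    match PySem.List.pyGet? test_cases i with
    | none => results         -- Python raises IndexError here; excluded by Pre_
    | some tc => results ++ [bSolve tc.1.2 tc.2]) []

-- ===== PRECONDITION & SPEC =====
-- Pre_ = exactly the inputs where A returns: A indexes test_cases[i] for i < C (C ≤ len),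
-- and in each processed test case needs dp[0] to exist (0 ≤ K) and reads prices[j-1]
-- for j = 1..K (K ≤ len(prices)); everywhere else Python raises IndexError.
def Pre_min_cost_to_buy_apples (C : Int) (test_cases : List ((Int × Int) × List Int)) : Prop :=
  C ≤ (test_cases.length : Int) ∧
  ∀ tc ∈ test_cases.take C.toNat, 0 ≤ tc.1.2 ∧ tc.1.2 ≤ (tc.2.length : Int)

instance (C : Int) (test_cases : List ((Int × Int) × List Int)) : Decidable (Pre_min_cost_to_buy_apples C test_cases) := by unfold Pre_min_cost_to_buy_apples; infer_instance

def pvWitness_min_cost_to_buy_apples : Int × (List ((Int × Int) × List Int)) :=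
  (2, [((3, 3), [1, 2, 3]), ((2, 4), [-1, 2, -1, 9])])

def Spec_min_cost_to_buy_apples (C : Int) (test_cases : List ((Int × Int) × List Int)) (out : List Int) : Prop := out = min_cost_to_buy_apples_alt C test_cases
instance (C : Int) (test_cases : List ((Int × Int) × List Int)) (out : List Int) : Decidable (Spec_min_cost_to_buy_apples C test_cases out) := by unfold Spec_min_cost_to_buy_apples; infer_instance

-- ===== CLAIM (what is proved, stated in full; the proofs are below) =====
def Claim_equal_min_cost_to_buy_apples : Prop := ∀ (C : Int) (test_cases : List ((Int × Int) × List Int)), Dom_min_cost_to_buy_apples C test_cases → Pre_min_cost_to_buy_apples C test_cases → Spec_min_cost_to_buy_apples C test_cases (min_cost_to_buy_apples C test_cases)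

-- ===== LEMMAS AND PROOFS =====
-- Both per-test-case solvers are proved to compute THE optimum (pvOpt): the least total
-- price of any multiset of packet weights summing to k.  pv_aOuter does it for A's
-- coin-outer scans; on B's side, pvOptT characterises the Bellman-Ford iterate f_t[k]
-- (optimum over solutions with AT MOST t packets), pv_bRounds shows t rounds reach
-- pvOptT t, and pvOptT_to_pvOpt collapses pvOptT K to pvOpt (a solution of amount
-- k ≤ K never needs more than K packets); pvOpt_unique then equates the two at K.

def pvP (pr : List Int) (j : ℕ) : Int := pr.getD (j-1) 0

def pvReach (pr : List Int) (m k : ℕ) (c : Int) : Prop :=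
  ∃ l : List ℕ, (∀ j ∈ l, 1 ≤ j ∧ j ≤ m ∧ pvP pr j ≠ -1) ∧ l.sum = k ∧ (l.map (pvP pr)).sum = c

def pvOpt (pr : List Int) (m k : ℕ) (o : Option Int) : Prop :=
  (∀ c, pvReach pr m k c → ∃ b, o = some b ∧ b ≤ c) ∧ (∀ b, o = some b → pvReach pr m k b)

theorem pvOpt_unique {pr : List Int} {m k : ℕ} {o o' : Option Int}
    (h : pvOpt pr m k o) (h' : pvOpt pr m k o') : o = o' := by
  match o, o' with
  | none, none => rfl
  | none, some b => obtain ⟨b', hb', _⟩ := h.1 b (h'.2 b rfl); cases hb'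
  | some b, none => obtain ⟨b', hb', _⟩ := h'.1 b (h.2 b rfl); cases hb'
  | some b, some b' =>
    obtain ⟨c1, hc1, hle1⟩ := h'.1 b (h.2 b rfl)
    obtain ⟨c2, hc2, hle2⟩ := h.1 b' (h'.2 b' rfl)
    simp only [Option.some.injEq] at hc1 hc2 ⊢
    omega

theorem pvReach_zero {pr : List Int} {m : ℕ} {c : Int} : pvReach pr m 0 c ↔ c = 0 := by
  constructor
  · rintro ⟨l, hall, hsum, hcost⟩
    have hl : l = [] := by
      cases l with
      | nil => rfl
      | cons a t =>
        have h1 := (hall a (by simp)).1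
        simp only [List.sum_cons] at hsum; omega
    subst hl; simp only [List.map_nil, List.sum_nil] at hcost; omega
  · rintro rfl; exact ⟨[], by simp⟩

theorem pvReach_bound_zero {pr : List Int} {k : ℕ} {c : Int} :
    pvReach pr 0 k c ↔ k = 0 ∧ c = 0 := by
  constructor
  · rintro ⟨l, hall, hsum, hcost⟩
    have hl : l = [] := by
      cases l with
      | nil => rfl
      | cons a t =>
        have := hall a (by simp)
        omega
    subst hl; simp only [List.sum_nil, List.map_nil] at hsum hcost; omega
  · rintro ⟨rfl, rfl⟩; exact ⟨[], by simp⟩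

theorem pvReach_mono {pr : List Int} {m m' k : ℕ} {c : Int} (h : m ≤ m')
    (hr : pvReach pr m k c) : pvReach pr m' k c := by
  obtain ⟨l, hall, hsum, hcost⟩ := hr
  exact ⟨l, fun j hj => ⟨(hall j hj).1, le_trans (hall j hj).2.1 h, (hall j hj).2.2⟩, hsum, hcost⟩

theorem pvReach_cons {pr : List Int} {m k : ℕ} {c : Int} (hk : 1 ≤ k) :
    pvReach pr m k c ↔ ∃ j, 1 ≤ j ∧ j ≤ m ∧ j ≤ k ∧ pvP pr j ≠ -1 ∧
      ∃ c', pvReach pr m (k - j) c' ∧ c = c' + pvP pr j := by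
  constructor
  · rintro ⟨l, hall, hsum, hcost⟩
    cases l with
    | nil => simp only [List.sum_nil] at hsum; omega
    | cons a t =>
      obtain ⟨h1, h2, h3⟩ := hall a (by simp)
      simp only [List.sum_cons] at hsum
      simp only [List.map_cons, List.sum_cons] at hcost
      refine ⟨a, h1, h2, by omega, h3, (t.map (pvP pr)).sum,
        ⟨t, fun j hj => hall j (by simp [hj]), by omega, rfl⟩, by omega⟩
  · rintro ⟨j, h1, h2, h3, h4, c', ⟨l, hall, hsum, hcost⟩, rfl⟩
    refine ⟨j :: l, ?_, ?_, ?_⟩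
    · intro x hx
      rcases List.mem_cons.1 hx with rfl | hx
      · exact ⟨h1, h2, h4⟩
      · exact hall x hx
    · simp only [List.sum_cons]; omega
    · simp only [List.map_cons, List.sum_cons]; omega

theorem pvReach_succ {pr : List Int} {j k : ℕ} {c : Int} :
    pvReach pr (j+1) k c ↔ pvReach pr j k c ∨ (pvP pr (j+1) ≠ -1 ∧ j+1 ≤ k ∧
      ∃ c', pvReach pr (j+1) (k - (j+1)) c' ∧ c = c' + pvP pr (j+1)) := by
  constructor
  · rintro ⟨l, hall, hsum, hcost⟩
    by_cases hmem : (j+1) ∈ l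
    · right
      have hperm := List.perm_cons_erase hmem
      have hall' : ∀ x ∈ l.erase (j+1), 1 ≤ x ∧ x ≤ j+1 ∧ pvP pr x ≠ -1 :=
        fun x hx => hall x (List.mem_of_mem_erase hx)
      have hsum' : (j+1) + (l.erase (j+1)).sum = k := by
        have hs := hperm.sum_eq; simp only [List.sum_cons] at hs; omega
      have hcost' : pvP pr (j+1) + ((l.erase (j+1)).map (pvP pr)).sum = c := by
        have hc2 := (hperm.map (pvP pr)).sum_eq
        simp only [List.map_cons, List.sum_cons] at hc2; omega
      exact ⟨(hall _ hmem).2.2, by omega,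
        ((l.erase (j+1)).map (pvP pr)).sum, ⟨l.erase (j+1), hall', by omega, rfl⟩, by omega⟩
    · left
      refine ⟨l, fun x hx => ⟨(hall x hx).1, ?_, (hall x hx).2.2⟩, hsum, hcost⟩
      have h2 := (hall x hx).2.1
      rcases Nat.lt_or_ge x (j+1) with h | h
      · omega
      · exact absurd (by omega : x = j+1) (fun he => hmem (he ▸ hx))
  · rintro (h | ⟨hp, hjk, c', hr, rfl⟩)
    · exact pvReach_mono (by omega) h
    · exact (pvReach_cons (by omega)).2 ⟨j+1, by omega, le_refl _, hjk, hp, c', hr, rfl⟩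

theorem pvReach_succ_bad {pr : List Int} {j k : ℕ} {c : Int} (hp : pvP pr (j+1) = -1) :
    pvReach pr (j+1) k c ↔ pvReach pr j k c := by
  rw [pvReach_succ]
  constructor
  · rintro (h | ⟨hp', _⟩)
    · exact h
    · exact absurd hp hp'
  · exact Or.inl

theorem pvReach_heavy {pr : List Int} {j k : ℕ} {c : Int} (hk : k < j+1) :
    pvReach pr (j+1) k c ↔ pvReach pr j k c := by
  rw [pvReach_succ]
  constructor
  · rintro (h | ⟨_, h, _⟩)
    · exact h
    · omega
  · exact Or.inl

theorem pvOpt_succ_bad {pr : List Int} {j k : ℕ} {o : Option Int} (hp : pvP pr (j+1) = -1)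
    (h : pvOpt pr j k o) : pvOpt pr (j+1) k o :=
  ⟨fun c hc => h.1 c ((pvReach_succ_bad hp).1 hc), fun b hb => (pvReach_succ_bad hp).2 (h.2 b hb)⟩

theorem pvOpt_heavy {pr : List Int} {j k : ℕ} {o : Option Int} (hk : k < j+1)
    (h : pvOpt pr j k o) : pvOpt pr (j+1) k o :=
  ⟨fun c hc => h.1 c ((pvReach_heavy hk).1 hc), fun b hb => (pvReach_heavy hk).2 (h.2 b hb)⟩

-- the value A's interior update writes
def pvCombine (o1 o2 : Option Int) (p : Int) : Option Int :=
  match o2 with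
  | none => o1
  | some v => match o1 with
    | none => some (v + p)
    | some w => some (min w (v + p))

-- A's interior update: combine old optimum (coins ≤ j) with optimum of k-(j+1) using coins ≤ j+1
theorem pvOpt_combine {pr : List Int} {j k : ℕ} {o1 o2 : Option Int}
    (hp : pvP pr (j+1) ≠ -1) (hjk : j+1 ≤ k)
    (h1 : pvOpt pr j k o1) (h2 : pvOpt pr (j+1) (k - (j+1)) o2) :
    pvOpt pr (j+1) k (pvCombine o1 o2 (pvP pr (j+1))) := by
  unfold pvCombine
  constructor
  · intro c hc
    rcases pvReach_succ.1 hc with h | ⟨_, _, c', hr', hc'⟩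
    · obtain ⟨b, hb, hle⟩ := h1.1 c h
      subst hb
      match o2 with
      | none => exact ⟨b, rfl, hle⟩
      | some v => exact ⟨min b (v + pvP pr (j+1)), rfl, le_trans (min_le_left _ _) hle⟩
    · obtain ⟨v', hv', hle'⟩ := h2.1 c' hr'
      subst hv'
      match o1 with
      | none => exact ⟨v' + pvP pr (j+1), rfl, by omega⟩
      | some w => exact ⟨min w (v' + pvP pr (j+1)), rfl, le_trans (min_le_right _ _) (by omega)⟩
  · intro b hb
    cases o2 with
    | none => exact pvReach_mono (by omega) (h1.2 b hb)
    | some v =>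
      have hrv := h2.2 v rfl
      have hcons : pvReach pr (j+1) k (v + pvP pr (j+1)) :=
        (pvReach_cons (by omega)).2 ⟨j+1, by omega, le_refl _, hjk, hp, v, hrv, rfl⟩
      cases o1 with
      | none => simp only [Option.some.injEq] at hb; subst hb; exact hcons
      | some w =>
        simp only [Option.some.injEq] at hb
        rcases min_choice w (v + pvP pr (j+1)) with hm | hm
        · rw [← hb, hm]; exact pvReach_mono (by omega) (h1.2 w rfl)
        · rw [← hb, hm]; exact hcons

theorem pv_getD_set_self (l : List (Option Int)) (n : ℕ) (v : Option Int) (h : n < l.length) :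
    (l.set n v).getD n none = v := by
  simp [List.getD_eq_getElem?_getD, h]
theorem pv_getD_set_ne (l : List (Option Int)) (m n : ℕ) (v : Option Int) (h : m ≠ n) :
    (l.set m v).getD n none = l.getD n none := by
  simp [List.getD_eq_getElem?_getD, h]

-- step functions (definitionally equal to the ports' inline lambdas)
-- A's inner forward scan with coin j'+1 over amounts j'+1 .. m
theorem pv_aInner (pr : List Int) (Kn j' : ℕ) (hjK : j' + 1 ≤ Kn)
    (hpne : pvP pr (j'+1) ≠ -1) :
    ∀ m : ℕ, j' ≤ m → m ≤ Kn → ∀ dp : List (Option Int), dp.length = Kn + 1 →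
    (∀ k, k ≤ Kn → pvOpt pr j' k (dp.getD k none)) →
    ((PySem.List.pyRange ((j' : Int)+1) ((m : Int)+1) 1).foldl
        (pvAStep ((j' : Int)+1) (pvP pr (j'+1))) dp).length = Kn + 1 ∧
    (∀ k, k ≤ m → k ≤ Kn →
        pvOpt pr (j'+1) k
          (((PySem.List.pyRange ((j' : Int)+1) ((m : Int)+1) 1).foldl
        (pvAStep ((j' : Int)+1) (pvP pr (j'+1))) dp).getD k none)) ∧
    (∀ k, m < k → k ≤ Kn →
        ((PySem.List.pyRange ((j' : Int)+1) ((m : Int)+1) 1).foldl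
        (pvAStep ((j' : Int)+1) (pvP pr (j'+1))) dp).getD k none = dp.getD k none) := by
  intro m
  induction m with
  | zero =>
    intro hj0 _ dp hlen hdp
    have hj' : j' = 0 := by omega
    subst hj'
    rw [show ((0:ℕ):Int) + 1 = 1 by norm_num, PySem.List.pyRange_one_eq_nil (by norm_num)]
    simp only [List.foldl_nil]
    refine ⟨hlen, ?_, by intro k _ _; trivial⟩
    intro k hk0 _
    have hk : k = 0 := by omega
    subst hk
    exact pvOpt_heavy (by omega) (hdp 0 (by omega))
  | succ m ih =>
    intro hjm hmK dp hlen hdp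
    rcases Nat.lt_or_ge m j' with hcase | hcase
    · -- j' = m+1: empty range
      have hj' : j' = m + 1 := by omega
      have hnil : PySem.List.pyRange ((j' : Int)+1) (((m+1 : ℕ) : Int)+1) 1 = [] := by
        apply PySem.List.pyRange_one_eq_nil
        push_cast; omega
      rw [hnil]
      simp only [List.foldl_nil]
      refine ⟨hlen, ?_, by intro k _ _; trivial⟩
      intro k hk hkK
      exact pvOpt_heavy (by omega) (hdp k hkK)
    · -- j' ≤ m: peel the last amount m+1
      have hsplit : PySem.List.pyRange ((j' : Int)+1) (((m+1 : ℕ) : Int)+1) 1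
          = PySem.List.pyRange ((j' : Int)+1) ((m : Int)+1) 1 ++ [(m : Int)+1] := by
        push_cast
        exact PySem.List.pyRange_one_succ_right (by omega)
      rw [hsplit, List.foldl_append]
      obtain ⟨ihlen, ihdone, ihrest⟩ := ih hcase (by omega) dp hlen hdp
      set dpm := (PySem.List.pyRange ((j' : Int)+1) ((m : Int)+1) 1).foldl
        (pvAStep ((j' : Int)+1) (pvP pr (j'+1))) dp with hdpm
      simp only [List.foldl_cons, List.foldl_nil]
      -- the step at amount m+1
      have hidx : ((m : Int)+1) - ((j' : Int)+1) = ((m - j' : ℕ) : Int) := by omega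
      have hcast1 : ((m : Int)+1) = (((m+1:ℕ)) : Int) := by push_cast; ring
      have ho2 : PySem.List.pyGetD dpm (((m : Int)+1) - ((j' : Int)+1)) none
          = dpm.getD (m - j') none := by
        rw [hidx, PySem.List.pyGetD_natCast]
      have ho1 : PySem.List.pyGetD dpm ((m : Int)+1) none = dpm.getD (m+1) none := by
        rw [hcast1, PySem.List.pyGetD_natCast]
      have hopt2 : pvOpt pr (j'+1) (m - j') (dpm.getD (m - j') none) :=
        ihdone (m - j') (by omega) (by omega)
      have hopt1 : pvOpt pr j' (m+1) (dpm.getD (m+1) none) := by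
        rw [ihrest (m+1) (by omega) (by omega)]
        exact hdp (m+1) (by omega)
      have hkk : (m+1) - (j'+1) = m - j' := by omega
      have hcomb := pvOpt_combine (pr := pr) (j := j') (k := m+1)
        hpne (by omega) hopt1 (by rw [hkk]; exact hopt2)
      have hset : ∀ v : Option Int, PySem.List.pySetD dpm ((m : Int)+1) v = dpm.set (m+1) v := by
        intro v; rw [hcast1, PySem.List.pySetD_natCast]
      cases h2 : dpm.getD (m - j') none with
      | none =>
        have hstep : pvAStep ((j' : Int)+1) (pvP pr (j'+1)) dpm ((m : Int)+1) = dpm := by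
          simp only [pvAStep, ho2, h2]
        rw [hstep]
        refine ⟨ihlen, ?_, ?_⟩
        · intro k hk hkK
          rcases Nat.lt_or_ge k (m+1) with hlt | hge
          · exact ihdone k (by omega) hkK
          · have hke : k = m+1 := by omega
            subst hke
            simpa only [pvCombine, h2] using hcomb
        · intro k hk hkK
          exact ihrest k (by omega) hkK
      | some v =>
        have hlt : m + 1 < dpm.length := by omega
        cases h1 : dpm.getD (m+1) none with
        | none =>
          have hstep : pvAStep ((j' : Int)+1) (pvP pr (j'+1)) dpm ((m : Int)+1)
              = dpm.set (m+1) (some (v + pvP pr (j'+1))) := by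
            simp only [pvAStep, ho2, h2, ho1, h1, hset]
          rw [hstep]
          refine ⟨by simpa using ihlen, ?_, ?_⟩
          · intro k hk hkK
            rcases Nat.lt_or_ge k (m+1) with hklt | hge
            · rw [pv_getD_set_ne dpm (m+1) k _ (by omega)]
              exact ihdone k (by omega) hkK
            · have hke : k = m+1 := by omega
              subst hke
              rw [pv_getD_set_self dpm (m+1) _ hlt]
              simpa only [pvCombine, h2, h1] using hcomb
          · intro k hk hkK
            rw [pv_getD_set_ne dpm (m+1) k _ (by omega)]
            exact ihrest k (by omega) hkK
        | some w =>
          have hstep : pvAStep ((j' : Int)+1) (pvP pr (j'+1)) dpm ((m : Int)+1)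
              = dpm.set (m+1) (some (min w (v + pvP pr (j'+1)))) := by
            simp only [pvAStep, ho2, h2, ho1, h1, hset]
          rw [hstep]
          refine ⟨by simpa using ihlen, ?_, ?_⟩
          · intro k hk hkK
            rcases Nat.lt_or_ge k (m+1) with hklt | hge
            · rw [pv_getD_set_ne dpm (m+1) k _ (by omega)]
              exact ihdone k (by omega) hkK
            · have hke : k = m+1 := by omega
              subst hke
              rw [pv_getD_set_self dpm (m+1) _ hlt]
              simpa only [pvCombine, h2, h1] using hcomb
          · intro k hk hkK
            rw [pv_getD_set_ne dpm (m+1) k _ (by omega)]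
            exact ihrest k (by omega) hkK

def pvDp0 (Kn : ℕ) : List (Option Int) := (List.replicate (Kn+1) (none : Option Int)).set 0 (some 0)

theorem pv_dp0_getD (Kn : ℕ) : ∀ k, (pvDp0 Kn).getD k none = if k = 0 then some 0 else none := by
  intro k
  unfold pvDp0
  rcases Nat.eq_zero_or_pos k with rfl | hk
  · rw [pv_getD_set_self _ _ _ (by simp), if_pos rfl]
  · rw [pv_getD_set_ne _ _ _ _ (by omega), if_neg (by omega)]
    rw [List.getD_eq_getElem?_getD, List.getElem?_replicate]
    split <;> rfl

theorem pv_aOuter (pr : List Int) (Kn : ℕ) (hK : Kn ≤ pr.length) :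
    ∀ j, j ≤ Kn →
      ((PySem.List.pyRange 1 ((j : Int)+1) 1).foldl (pvAOuterStep pr (Kn : Int)) (pvDp0 Kn)).length = Kn + 1 ∧
      (∀ k, k ≤ Kn → pvOpt pr j k
        (((PySem.List.pyRange 1 ((j : Int)+1) 1).foldl (pvAOuterStep pr (Kn : Int)) (pvDp0 Kn)).getD k none)) := by
  intro j
  induction j with
  | zero =>
    intro _
    rw [show ((0:ℕ):Int) + 1 = 1 by norm_num, PySem.List.pyRange_one_eq_nil (by norm_num)]
    simp only [List.foldl_nil]
    constructor
    · unfold pvDp0; rw [List.length_set, List.length_replicate]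
    · intro k hkK
      rw [pv_dp0_getD]
      rcases Nat.eq_zero_or_pos k with rfl | hk
      · rw [if_pos rfl]
        constructor
        · intro c hc
          exact ⟨0, rfl, le_of_eq (pvReach_zero.1 hc).symm⟩
        · intro b hb
          simp only [Option.some.injEq] at hb
          subst hb
          exact pvReach_zero.2 rfl
      · rw [if_neg (by omega)]
        constructor
        · intro c hc
          exact absurd (pvReach_bound_zero.1 hc).1 (by omega)
        · intro b hb; cases hb
  | succ j ih =>
    intro hjK
    obtain ⟨ihlen, ihopt⟩ := ih (by omega)
    have hsplit : PySem.List.pyRange 1 (((j+1:ℕ) : Int)+1) 1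
        = PySem.List.pyRange 1 ((j : Int)+1) 1 ++ [(j : Int)+1] := by
      push_cast
      exact PySem.List.pyRange_one_succ_right (by omega)
    rw [hsplit, List.foldl_append]
    set T := (PySem.List.pyRange 1 ((j : Int)+1) 1).foldl (pvAOuterStep pr (Kn : Int)) (pvDp0 Kn) with hT
    simp only [List.foldl_cons, List.foldl_nil]
    have hjlen : j < pr.length := by omega
    have hget : PySem.List.pyGet? pr (((j : Int)+1) - 1) = some (pr.getD j 0) := by
      rw [show ((j : Int)+1) - 1 = (j : Int) by ring, PySem.List.pyGet?_natCast,
        List.getElem?_eq_getElem hjlen, List.getD_eq_getElem _ _ hjlen]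
    have hpv : pvP pr (j+1) = pr.getD j 0 := rfl
    have hstepeq : pvAOuterStep pr (Kn : Int) T ((j : Int)+1)
        = if pr.getD j 0 ≠ -1 then
            (PySem.List.pyRange ((j : Int)+1) ((Kn : Int) + 1) 1).foldl (pvAStep ((j : Int)+1) (pr.getD j 0)) T
          else T := by
      simp only [pvAOuterStep, hget]
    rw [hstepeq]
    by_cases hpne : pr.getD j 0 ≠ -1
    · rw [if_pos hpne]
      have hres := pv_aInner pr Kn j (by omega) (by rw [hpv]; exact hpne) Kn (by omega) (le_refl _)
        T ihlen ihopt
      obtain ⟨rlen, rdone, _⟩ := hres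
      rw [hpv] at rlen rdone
      exact ⟨rlen, fun k hkK => rdone k hkK hkK⟩
    · rw [if_neg hpne]
      rw [not_not] at hpne
      refine ⟨ihlen, ?_⟩
      intro k hkK
      exact pvOpt_succ_bad (by rw [hpv]; exact hpne) (ihopt k hkK)

-- ===== B-side: Bellman-Ford characterisation =====

-- reachability with a bound t on the number of packets used
def pvReachT (pr : List Int) (m k : ℕ) (c : Int) (t : ℕ) : Prop :=
  ∃ l : List ℕ, (∀ j ∈ l, 1 ≤ j ∧ j ≤ m ∧ pvP pr j ≠ -1) ∧ l.sum = k ∧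
    (l.map (pvP pr)).sum = c ∧ l.length ≤ t

def pvOptT (pr : List Int) (m k t : ℕ) (o : Option Int) : Prop :=
  (∀ c, pvReachT pr m k c t → ∃ b, o = some b ∧ b ≤ c) ∧
  (∀ b, o = some b → pvReachT pr m k b t)

theorem pvReachT_mono_t {pr : List Int} {m k : ℕ} {c : Int} {t t' : ℕ} (h : t ≤ t')
    (hr : pvReachT pr m k c t) : pvReachT pr m k c t' := by
  obtain ⟨l, h1, h2, h3, h4⟩ := hr
  exact ⟨l, h1, h2, h3, by omega⟩

theorem pvReachT_to_reach {pr : List Int} {m k : ℕ} {c : Int} {t : ℕ}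
    (hr : pvReachT pr m k c t) : pvReach pr m k c := by
  obtain ⟨l, h1, h2, h3, _⟩ := hr
  exact ⟨l, h1, h2, h3⟩

theorem pv_length_le_sum : ∀ l : List ℕ, (∀ j ∈ l, 1 ≤ j) → l.length ≤ l.sum := by
  intro l
  induction l with
  | nil => intro _; simp
  | cons a t ih =>
    intro h
    have h1 := h a (by simp)
    have h2 := ih (fun j hj => h j (by simp [hj]))
    simp only [List.length_cons, List.sum_cons]
    omega

theorem pvReach_to_reachT {pr : List Int} {m k : ℕ} {c : Int} {t : ℕ} (hkt : k ≤ t)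
    (hr : pvReach pr m k c) : pvReachT pr m k c t := by
  obtain ⟨l, h1, h2, h3⟩ := hr
  have := pv_length_le_sum l (fun j hj => (h1 j hj).1)
  exact ⟨l, h1, h2, h3, by omega⟩

theorem pvOptT_to_pvOpt {pr : List Int} {m k t : ℕ} {o : Option Int} (hkt : k ≤ t)
    (h : pvOptT pr m k t o) : pvOpt pr m k o :=
  ⟨fun c hc => h.1 c (pvReach_to_reachT hkt hc),
   fun b hb => pvReachT_to_reach (h.2 b hb)⟩

theorem pvReachT_t_zero {pr : List Int} {m k : ℕ} {c : Int} :
    pvReachT pr m k c 0 ↔ k = 0 ∧ c = 0 := by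
  constructor
  · rintro ⟨l, _, h2, h3, h4⟩
    have hl : l = [] := by
      cases l with
      | nil => rfl
      | cons a s =>
        simp only [List.length_cons] at h4
        omega
    subst hl
    simp only [List.sum_nil, List.map_nil] at h2 h3
    omega
  · rintro ⟨rfl, rfl⟩; exact ⟨[], by simp⟩

theorem pvReachT_k_zero {pr : List Int} {m t : ℕ} {c : Int} :
    pvReachT pr m 0 c t ↔ c = 0 := by
  constructor
  · rintro ⟨l, h1, h2, h3, _⟩
    have hl : l = [] := by
      cases l with
      | nil => rfl
      | cons a s =>
        have := (h1 a (by simp)).1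
        simp only [List.sum_cons] at h2
        omega
    subst hl
    simp only [List.map_nil, List.sum_nil] at h3
    omega
  · rintro rfl; exact ⟨[], by simp⟩

theorem pvOptT_k_zero_shift {pr : List Int} {m t t' : ℕ} {o : Option Int}
    (h : pvOptT pr m 0 t o) : pvOptT pr m 0 t' o := by
  constructor
  · intro c hc
    exact h.1 c (pvReachT_k_zero.2 (pvReachT_k_zero.1 hc))
  · intro b hb
    exact pvReachT_k_zero.2 (pvReachT_k_zero.1 (h.2 b hb))

-- peel one packet off a ≤(t+1)-packet solution
theorem pvReachT_succ_t {pr : List Int} {m k : ℕ} {c : Int} {t : ℕ} :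
    pvReachT pr m k c (t+1) ↔ pvReachT pr m k c t ∨
      ∃ j, 1 ≤ j ∧ j ≤ m ∧ j ≤ k ∧ pvP pr j ≠ -1 ∧
        ∃ c', pvReachT pr m (k - j) c' t ∧ c = c' + pvP pr j := by
  constructor
  · rintro ⟨l, h1, h2, h3, h4⟩
    cases l with
    | nil =>
      left
      exact ⟨[], by simp, h2, h3, by simp⟩
    | cons a s =>
      right
      obtain ⟨ha1, ha2, ha3⟩ := h1 a (by simp)
      simp only [List.sum_cons] at h2
      simp only [List.map_cons, List.sum_cons] at h3
      simp only [List.length_cons] at h4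
      exact ⟨a, ha1, ha2, by omega, ha3, (s.map (pvP pr)).sum,
        ⟨s, fun j hj => h1 j (by simp [hj]), by omega, rfl, by omega⟩, by omega⟩
  · rintro (h | ⟨j, h1, h2, h3, h4, c', ⟨l, g1, g2, g3, g4⟩, rfl⟩)
    · exact pvReachT_mono_t (by omega) h
    · refine ⟨j :: l, ?_, ?_, ?_, ?_⟩
      · intro x hx
        rcases List.mem_cons.1 hx with rfl | hx
        · exact ⟨h1, h2, h4⟩
        · exact g1 x hx
      · simp only [List.sum_cons]; omega
      · simp only [List.map_cons, List.sum_cons]; omega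
      · simp only [List.length_cons]; omega

-- B's innermost fold over j = 1..u at amount k, reading the previous round's vector f
theorem pv_bInner (pr : List Int) (Kn k : ℕ) (hkK : k ≤ Kn) (hK : Kn ≤ pr.length)
    (f : List (Option Int)) (a0 : Option Int) :
    ∀ u, u ≤ k →
      (∀ b, (PySem.List.pyRange 1 ((u : Int)+1) 1).foldl (pvBInnerStep pr f (k : Int)) a0 = some b →
        a0 = some b ∨ ∃ j v, 1 ≤ j ∧ j ≤ u ∧ pvP pr j ≠ -1 ∧
          f.getD (k-j) none = some v ∧ b = v + pvP pr j) ∧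
      (∀ b0, a0 = some b0 →
        ∃ b, (PySem.List.pyRange 1 ((u : Int)+1) 1).foldl (pvBInnerStep pr f (k : Int)) a0 = some b ∧ b ≤ b0) ∧
      (∀ j v, 1 ≤ j → j ≤ u → pvP pr j ≠ -1 → f.getD (k-j) none = some v →
        ∃ b, (PySem.List.pyRange 1 ((u : Int)+1) 1).foldl (pvBInnerStep pr f (k : Int)) a0 = some b ∧
          b ≤ v + pvP pr j) := by
  intro u
  induction u with
  | zero =>
    intro _
    rw [show ((0:ℕ):Int) + 1 = 1 by norm_num, PySem.List.pyRange_one_eq_nil (by norm_num)]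
    simp only [List.foldl_nil]
    exact ⟨fun b hb => Or.inl hb,
      fun b0 hb0 => ⟨b0, hb0, le_refl _⟩,
      fun j v h1 h2 _ _ => absurd h2 (by omega)⟩
  | succ u ih =>
    intro huk
    obtain ⟨ih1, ih2, ih3⟩ := ih (by omega)
    have hsplit : PySem.List.pyRange 1 (((u+1:ℕ) : Int)+1) 1
        = PySem.List.pyRange 1 ((u : Int)+1) 1 ++ [(u : Int)+1] := by
      push_cast
      exact PySem.List.pyRange_one_succ_right (by omega)
    rw [hsplit, List.foldl_append]
    simp only [List.foldl_cons, List.foldl_nil]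
    generalize hbg : (PySem.List.pyRange 1 ((u : Int)+1) 1).foldl (pvBInnerStep pr f (k : Int)) a0 = best at ih1 ih2 ih3
    have hulen : u < pr.length := by omega
    have hget : PySem.List.pyGet? pr (((u : Int)+1) - 1) = some (pr.getD u 0) := by
      rw [show ((u : Int)+1) - 1 = (u : Int) by ring, PySem.List.pyGet?_natCast,
        List.getElem?_eq_getElem hulen, List.getD_eq_getElem _ _ hulen]
    have hpv : pvP pr (u+1) = pr.getD u 0 := rfl
    have hidx : ((k : Int)) - ((u : Int)+1) = ((k - (u+1) : ℕ) : Int) := by omega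
    have hgd : PySem.List.pyGetD f ((k : Int) - ((u : Int)+1)) none = f.getD (k - (u+1)) none := by
      rw [hidx, PySem.List.pyGetD_natCast]
    by_cases hpne : pr.getD u 0 ≠ -1
    · cases h2 : f.getD (k - (u+1)) none with
      | none =>
        have hstep : pvBInnerStep pr f (k : Int) best ((u : Int)+1) = best := by
          simp only [pvBInnerStep, hget, if_pos hpne, hgd, h2]
        rw [hstep]
        refine ⟨?_, ih2, ?_⟩
        · intro b hb
          rcases ih1 b hb with h | ⟨j, v, hj1, hj2, hj3, hj4, hj5⟩
          · exact Or.inl h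
          · exact Or.inr ⟨j, v, hj1, by omega, hj3, hj4, hj5⟩
        · intro j v hj1 hj2 hj3 hj4
          rcases Nat.lt_or_ge j (u+1) with hjt | hjt
          · exact ih3 j v hj1 (by omega) hj3 hj4
          · have hje : j = u+1 := by omega
            subst hje
            rw [hj4] at h2; cases h2
      | some v =>
        cases hb : best with
        | none =>
          have hstep : pvBInnerStep pr f (k : Int) none ((u : Int)+1) = some (v + pr.getD u 0) := by
            simp only [pvBInnerStep, hget, if_pos hpne, hgd, h2]
          rw [hb] at ih1 ih2 ih3
          rw [hstep]
          refine ⟨?_, ?_, ?_⟩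
          · intro b hbe
            simp only [Option.some.injEq] at hbe
            exact Or.inr ⟨u+1, v, by omega, le_refl _, by rw [hpv]; exact hpne, h2,
              by rw [hpv, ← hbe]⟩
          · intro b0 hb0
            obtain ⟨b, hbb, _⟩ := ih2 b0 hb0
            cases hbb
          · intro j v' hj1 hj2 hj3 hj4
            rcases Nat.lt_or_ge j (u+1) with hjt | hjt
            · obtain ⟨b, hbb, _⟩ := ih3 j v' hj1 (by omega) hj3 hj4
              cases hbb
            · have hje : j = u+1 := by omega
              subst hje
              have hv : v' = v := by
                have hh := hj4.symm.trans h2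
                injection hh
              rw [hpv, hv]
              exact ⟨v + pr.getD u 0, rfl, le_refl _⟩
        | some b =>
          have hstep : pvBInnerStep pr f (k : Int) (some b) ((u : Int)+1)
              = if v + pr.getD u 0 < b then some (v + pr.getD u 0) else some b := by
            simp only [pvBInnerStep, hget, if_pos hpne, hgd, h2]
          rw [hb] at ih1 ih2 ih3
          rw [hstep]
          refine ⟨?_, ?_, ?_⟩
          · intro b' hb'
            split at hb'
            · simp only [Option.some.injEq] at hb'
              exact Or.inr ⟨u+1, v, by omega, le_refl _, by rw [hpv]; exact hpne, h2,
                by rw [hpv, ← hb']⟩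
            · rcases ih1 b' hb' with h | ⟨j, v', hj1, hj2, hj3, hj4, hj5⟩
              · exact Or.inl h
              · exact Or.inr ⟨j, v', hj1, by omega, hj3, hj4, hj5⟩
          · intro b0 hb0
            obtain ⟨b2, hb2, hle2⟩ := ih2 b0 hb0
            simp only [Option.some.injEq] at hb2
            split
            · exact ⟨v + pr.getD u 0, rfl, by omega⟩
            · exact ⟨b, rfl, by omega⟩
          · intro j v' hj1 hj2 hj3 hj4
            rcases Nat.lt_or_ge j (u+1) with hjt | hjt
            · obtain ⟨b2, hb2, hle2⟩ := ih3 j v' hj1 (by omega) hj3 hj4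
              simp only [Option.some.injEq] at hb2
              split
              · exact ⟨v + pr.getD u 0, rfl, by omega⟩
              · exact ⟨b, rfl, by omega⟩
            · have hje : j = u+1 := by omega
              subst hje
              have hv : v' = v := by
                have hh := hj4.symm.trans h2
                injection hh
              rw [hpv, hv]
              split
              · exact ⟨v + pr.getD u 0, rfl, le_refl _⟩
              · exact ⟨b, rfl, by omega⟩
    · rw [not_not] at hpne
      have hstep : pvBInnerStep pr f (k : Int) best ((u : Int)+1) = best := by
        simp only [pvBInnerStep, hget, hpne]
        simp
      rw [hstep]
      refine ⟨?_, ih2, ?_⟩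
      · intro b hb
        rcases ih1 b hb with h | ⟨j, v, hj1, hj2, hj3, hj4, hj5⟩
        · exact Or.inl h
        · exact Or.inr ⟨j, v, hj1, by omega, hj3, hj4, hj5⟩
      · intro j v hj1 hj2 hj3 hj4
        rcases Nat.lt_or_ge j (u+1) with hjt | hjt
        · exact ih3 j v hj1 (by omega) hj3 hj4
        · have hje : j = u+1 := by omega
          subst hje
          rw [hpv] at hj3
          exact absurd hpne hj3

-- one cell of one round: starting from g[k] = f[k], scanning j = 1..k yields the
-- optimum for amount k with at most t+1 packets
theorem pv_bCell (pr : List Int) (Kn k t : ℕ) (_hk1 : 1 ≤ k) (hkK : k ≤ Kn)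
    (hK : Kn ≤ pr.length) (f : List (Option Int))
    (hf : ∀ k', k' ≤ Kn → pvOptT pr Kn k' t (f.getD k' none)) :
    pvOptT pr Kn k (t+1)
      ((PySem.List.pyRange 1 ((k : Int)+1) 1).foldl (pvBInnerStep pr f (k : Int)) (f.getD k none)) := by
  obtain ⟨f1, f2, f3⟩ := pv_bInner pr Kn k hkK hK f (f.getD k none) k (le_refl _)
  constructor
  · intro c hc
    rcases pvReachT_succ_t.1 hc with h | ⟨j, hj1, _, hjk, hjp, c', hr', rfl⟩
    · obtain ⟨b0, hb0, hle0⟩ := (hf k hkK).1 c h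
      obtain ⟨b, hb, hble⟩ := f2 b0 hb0
      exact ⟨b, hb, by omega⟩
    · obtain ⟨v, hv, hvle⟩ := (hf (k-j) (by omega)).1 c' hr'
      obtain ⟨b, hb, hble⟩ := f3 j v hj1 hjk hjp hv
      exact ⟨b, hb, by omega⟩
  · intro b hb
    rcases f1 b hb with h | ⟨j, v, hj1, hj2, hj3, hj4, rfl⟩
    · exact pvReachT_mono_t (by omega) ((hf k hkK).2 b h)
    · have hr := (hf (k-j) (by omega)).2 v hj4
      exact pvReachT_succ_t.2 (Or.inr ⟨j, hj1, by omega, hj2, hj3, v, hr, rfl⟩)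

-- one full round advances the whole vector from level t to level t+1
theorem pv_bRound (pr : List Int) (Kn t : ℕ) (hK : Kn ≤ pr.length)
    (f : List (Option Int)) (hlen : f.length = Kn + 1)
    (hf : ∀ k, k ≤ Kn → pvOptT pr Kn k t (f.getD k none)) :
    ∀ n, n ≤ Kn →
      ((PySem.List.pyRange 1 ((n : Int)+1) 1).foldl (fun g k =>
        PySem.List.pySetD g k
          ((PySem.List.pyRange 1 (k + 1) 1).foldl (pvBInnerStep pr f k) (PySem.List.pyGetD g k none))) f).length = Kn + 1 ∧
      (∀ k, 1 ≤ k → k ≤ n →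
        pvOptT pr Kn k (t+1)
          (((PySem.List.pyRange 1 ((n : Int)+1) 1).foldl (fun g k =>
            PySem.List.pySetD g k
              ((PySem.List.pyRange 1 (k + 1) 1).foldl (pvBInnerStep pr f k) (PySem.List.pyGetD g k none))) f).getD k none)) ∧
      (∀ k, k ≤ Kn → n < k ∨ k = 0 →
        ((PySem.List.pyRange 1 ((n : Int)+1) 1).foldl (fun g k =>
          PySem.List.pySetD g k
            ((PySem.List.pyRange 1 (k + 1) 1).foldl (pvBInnerStep pr f k) (PySem.List.pyGetD g k none))) f).getD k none = f.getD k none) := by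
  intro n
  induction n with
  | zero =>
    intro _
    rw [show ((0:ℕ):Int) + 1 = 1 by norm_num, PySem.List.pyRange_one_eq_nil (by norm_num)]
    simp only [List.foldl_nil]
    refine ⟨hlen, ?_, ?_⟩
    · intro k hk1 hk0
      exact absurd hk0 (by omega)
    · intro k _ _
      trivial
  | succ n ih =>
    intro hnK
    obtain ⟨ihlen, ihdone, ihrest⟩ := ih (by omega)
    have hsplit : PySem.List.pyRange 1 (((n+1:ℕ) : Int)+1) 1
        = PySem.List.pyRange 1 ((n : Int)+1) 1 ++ [(n : Int)+1] := by
      push_cast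
      exact PySem.List.pyRange_one_succ_right (by omega)
    rw [hsplit, List.foldl_append]
    set G := (PySem.List.pyRange 1 ((n : Int)+1) 1).foldl (fun g k =>
      PySem.List.pySetD g k
        ((PySem.List.pyRange 1 (k + 1) 1).foldl (pvBInnerStep pr f k) (PySem.List.pyGetD g k none))) f with hG
    simp only [List.foldl_cons, List.foldl_nil]
    have hcast : ((n : Int)+1) = (((n+1:ℕ)) : Int) := by push_cast; ring
    have hGk : PySem.List.pyGetD G ((n : Int)+1) none = f.getD (n+1) none := by
      rw [hcast, PySem.List.pyGetD_natCast]
      exact ihrest (n+1) (by omega) (Or.inl (by omega))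
    have hset : ∀ v : Option Int,
        PySem.List.pySetD G ((n : Int)+1) v = G.set (n+1) v := by
      intro v; rw [hcast, PySem.List.pySetD_natCast]
    rw [hGk, hset]
    have hcell := pv_bCell pr Kn (n+1) t (by omega) hnK hK f hf
    rw [← hcast] at hcell
    refine ⟨by simpa using ihlen, ?_, ?_⟩
    · intro k hk1 hkn
      rcases Nat.lt_or_ge k (n+1) with hklt | hge
      · rw [pv_getD_set_ne G (n+1) k _ (by omega)]
        exact ihdone k hk1 (by omega)
      · have hke : k = n+1 := by omega
        subst hke
        rw [pv_getD_set_self G (n+1) _ (by omega)]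
        exact hcell
    · intro k hkK' hk
      rw [pv_getD_set_ne G (n+1) k _ (by omega)]
      exact ihrest k hkK' (by omega)

-- after t rounds the vector is exactly the level-t Bellman-Ford iterate
theorem pv_bRounds (pr : List Int) (Kn : ℕ) (hK : Kn ≤ pr.length) :
    ∀ t : ℕ,
      ((PySem.List.pyRange 0 (t : Int) 1).foldl (fun f _ => pvBRound pr (Kn : Int) f)
        (some 0 :: List.replicate Kn none)).length = Kn + 1 ∧
      (∀ k, k ≤ Kn → pvOptT pr Kn k t
        (((PySem.List.pyRange 0 (t : Int) 1).foldl (fun f _ => pvBRound pr (Kn : Int) f)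
          (some 0 :: List.replicate Kn none)).getD k none)) := by
  intro t
  induction t with
  | zero =>
    rw [PySem.List.pyRange_one_eq_nil (by norm_num)]
    simp only [List.foldl_nil]
    refine ⟨by simp, ?_⟩
    intro k hkK
    rcases Nat.eq_zero_or_pos k with rfl | hk
    · constructor
      · intro c hc
        obtain ⟨-, rfl⟩ := pvReachT_t_zero.1 hc
        exact ⟨0, rfl, le_refl _⟩
      · intro b hb
        have hb0 : b = 0 := by
          have : (some (0:Int) :: List.replicate Kn (none : Option Int)).getD 0 none = some 0 := rfl
          rw [this] at hb
          injection hb with h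
          omega
        subst hb0
        exact pvReachT_t_zero.2 ⟨rfl, rfl⟩
    · have hnone : (some (0:Int) :: List.replicate Kn (none : Option Int)).getD k none = none := by
        cases k with
        | zero => omega
        | succ k' =>
          show (List.replicate Kn (none : Option Int)).getD k' none = none
          rw [List.getD_eq_getElem?_getD, List.getElem?_replicate]
          split <;> rfl
      rw [hnone]
      constructor
      · intro c hc
        exact absurd (pvReachT_t_zero.1 hc).1 (by omega)
      · intro b hb; cases hb
  | succ t ih =>
    obtain ⟨ihlen, ihopt⟩ := ih
    have hsplit : PySem.List.pyRange 0 ((t+1:ℕ) : Int) 1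
        = PySem.List.pyRange 0 (t : Int) 1 ++ [(t : Int)] := by
      push_cast
      exact PySem.List.pyRange_one_succ_right (by omega)
    rw [hsplit, List.foldl_append]
    set F := (PySem.List.pyRange 0 (t : Int) 1).foldl (fun f _ => pvBRound pr (Kn : Int) f)
      (some 0 :: List.replicate Kn none) with hF
    simp only [List.foldl_cons, List.foldl_nil]
    have hround := pv_bRound pr Kn t hK F ihlen ihopt Kn (le_refl _)
    obtain ⟨rlen, rdone, rrest⟩ := hround
    have hBR : pvBRound pr (Kn : Int) F
        = (PySem.List.pyRange 1 ((Kn : Int)+1) 1).foldl (fun g k =>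
            PySem.List.pySetD g k
              ((PySem.List.pyRange 1 (k + 1) 1).foldl (pvBInnerStep pr F k) (PySem.List.pyGetD g k none))) F := rfl
    rw [hBR]
    refine ⟨rlen, ?_⟩
    intro k hkK
    rcases Nat.eq_zero_or_pos k with rfl | hk
    · rw [rrest 0 (by omega) (Or.inr rfl)]
      exact pvOptT_k_zero_shift (ihopt 0 (by omega))
    · exact rdone k hk hkK

theorem pv_solve_eq (K : Int) (pr : List Int) (h0 : 0 ≤ K) (hK : K ≤ (pr.length : Int)) :
    aSolve K pr = bSolve K pr := by
  obtain ⟨Kn, rfl⟩ : ∃ n : ℕ, K = (n : Int) := ⟨K.toNat, (Int.toNat_of_nonneg h0).symm⟩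
  have hKn : Kn ≤ pr.length := by exact_mod_cast hK
  have hdp0 : PySem.List.pySetD (List.replicate (((Kn : Int) + 1)).toNat (none : Option Int)) 0 (some 0)
      = pvDp0 Kn := by
    unfold pvDp0
    rw [show (0:Int) = ((0:ℕ):Int) from rfl, PySem.List.pySetD_natCast,
      show ((Kn : Int) + 1).toNat = Kn + 1 by omega]
  obtain ⟨halen, haopt⟩ := pv_aOuter pr Kn hKn Kn (le_refl _)
  obtain ⟨hblen, hbopt⟩ := pv_bRounds pr Kn hKn Kn
  have hA := haopt Kn (le_refl _)
  have hB := pvOptT_to_pvOpt (le_refl _) (hbopt Kn (le_refl _))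
  have heq := pvOpt_unique hA hB
  have hrep : ((Kn : Int)).toNat = Kn := by omega
  simp only [aSolve, bSolve, hdp0, hrep]
  rw [PySem.List.pyGetD_natCast, PySem.List.pyGetD_natCast, heq]

-- ===== VERDICT (by name: the statement is the Claim_ definition above) =====
theorem min_cost_to_buy_apples_spec : Claim_equal_min_cost_to_buy_apples := by
  intro C tcs _ hpre
  unfold Spec_min_cost_to_buy_apples min_cost_to_buy_apples min_cost_to_buy_apples_alt
  apply PySem.List.foldl_congr_mem
  intro acc i hi
  rw [PySem.List.mem_pyRange_one] at hi
  obtain ⟨h0, hC⟩ := hi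
  obtain ⟨hlen, hall⟩ := hpre
  have hlt : i.toNat < tcs.length := by omega
  have hget : PySem.List.pyGet? tcs i = some tcs[i.toNat] := by
    conv_lhs => rw [show i = ((i.toNat : ℕ) : Int) by omega]
    rw [PySem.List.pyGet?_natCast, List.getElem?_eq_getElem hlt]
  rw [hget]
  show acc ++ [aSolve tcs[i.toNat].1.2 tcs[i.toNat].2]
      = acc ++ [bSolve tcs[i.toNat].1.2 tcs[i.toNat].2]
  have hmem : tcs[i.toNat] ∈ tcs.take C.toNat := by
    have hlt2 : i.toNat < (tcs.take C.toNat).length := by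
      rw [List.length_take]; omega
    have hg : (tcs.take C.toNat)[i.toNat] = tcs[i.toNat] := List.getElem_take
    rw [← hg]
    exact List.getElem_mem hlt2
  obtain ⟨hK0, hKlen⟩ := hall _ hmem
  rw [pv_solve_eq _ _ hK0 hKlen]
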